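-- pv_equiv track=rewrite | github.com/dbandala/algorithms-data-structures | interview-problems/watch_score.py | getMinScore
-- ===== SOURCE A (Python) =====
-- def getMinScore(watch_history, series1, series2):
--     # input:
--     #   watch_history: list
--     #   series1: int
--     #   series2: int
--     # return: int (minimum watch score)
--     # first approach: use a sliding window to explore all contiguous sublist
--
--     # verify edge cases
--     n = len(watch_history)
--     if n==0:
--         return 0
--     if n==1:
--         return 1
--
--     if series1 is None or series2 is None or series1 not in watch_history or series2 not in watch_history:
--         return 0
--
--     # minimum_score = n
--     # for i in range(n-1):
--     #     for j in range(i+1, n):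
--     #         distinct_series = {} # dictionary to store values
--     #         for k in range(i, j):
--     #             if watch_history[k] not in distinct_series:
--     #                 distinct_series[watch_history[k]] = 0
--     #             else:
--     #                 distinct_series[watch_history[k]] += 1
--     #         if series1 in distinct_series and series2 in distinct_series:
--     #             minimum_score = min(minimum_score, len(distinct_series))
--
--     # another approach
--     # iterate through the watch history
--     # store the indexes of the series1 and series2 in the watch history
--     # if both series1 and series2 are found, calculate the minimum score
--     # return the minimum score
--     series1_index = -1
--     series2_index = -1
--     minimum_score = n
--     for i in range(n):
--         if watch_history[i] == series1:
--             series1_index = i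
--         if watch_history[i] == series2:
--             series2_index = i
--         if series1_index != -1 and series2_index != -1:
--             minimum_score = min(minimum_score, abs(series1_index - series2_index) + 1)
--
--     return minimum_score
-- ===== SOURCE B (Python) =====
-- def getMinScore(watch_history, series1, series2):
--     n = len(watch_history)
--     if n == 0:
--         return 0
--     if n == 1:
--         return 1
--     if series1 is None or series2 is None or series1 not in watch_history or series2 not in watch_history:
--         return 0
--     # collect the two position lists once, then minimise the gap over all cross pairs
--     pos1 = [i for i, v in enumerate(watch_history) if v == series1]
--     pos2 = [i for i, v in enumerate(watch_history) if v == series2]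
--     ans = n
--     for i in pos1:
--         for j in pos2:
--             d = abs(i - j) + 1
--             if d < ans:
--                 ans = d
--     return ans
-- ===== Notes on version B (the rewrite author's own statement) =====
-- stated objective: alternative
-- what changed: A scans once keeping the last-seen index of each series and min-ing their distance at every step; B instead collects the two position lists up front and minimises |i-j|+1 over all cross pairs of positions.
import Mathlib
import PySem

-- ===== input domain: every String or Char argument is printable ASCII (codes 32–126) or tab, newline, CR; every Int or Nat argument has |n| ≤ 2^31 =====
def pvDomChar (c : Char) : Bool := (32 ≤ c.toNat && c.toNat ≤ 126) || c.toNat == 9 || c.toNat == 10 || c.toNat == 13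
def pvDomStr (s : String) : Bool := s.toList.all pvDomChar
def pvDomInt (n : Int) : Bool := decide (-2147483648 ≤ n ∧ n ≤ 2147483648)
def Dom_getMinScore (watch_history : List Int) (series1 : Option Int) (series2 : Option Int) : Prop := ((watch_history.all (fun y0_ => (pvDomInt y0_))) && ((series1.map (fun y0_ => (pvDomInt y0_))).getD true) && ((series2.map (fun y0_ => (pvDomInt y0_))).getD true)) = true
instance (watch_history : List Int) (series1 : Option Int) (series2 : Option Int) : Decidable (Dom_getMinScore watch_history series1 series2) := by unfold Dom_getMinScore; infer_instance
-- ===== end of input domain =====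

-- B replaces A's single scan with last-seen indices by two position lists and a
-- cross-pair minimisation (objective: alternative decomposition, same results).

-- ===== PORT A =====
-- A's `for i in range(n)` loop over watch_history[i], carrying
-- (series1_index, series2_index, minimum_score); the index i is the counter k.
def aLoop (a b : Int) : List Int → Nat → Int × Int × Int → Int × Int × Int
  | [], _, st => st
  | e :: t, k, (i1, i2, m) =>
    let i1' : Int := if e = a then (k : Int) else i1
    let i2' : Int := if e = b then (k : Int) else i2
    let m' : Int := if i1' ≠ -1 ∧ i2' ≠ -1 then min m (|i1' - i2'| + 1) else m
    aLoop a b t (k + 1) (i1', i2', m')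

def getMinScore (watch_history : List Int) (series1 : Option Int) (series2 : Option Int) : Int :=
  let n : Int := watch_history.length
  if n = 0 then 0
  else if n = 1 then 1
  else
    match series1, series2 with
    | some a, some b =>
      if a ∉ watch_history ∨ b ∉ watch_history then 0
      else (aLoop a b watch_history 0 (-1, -1, n)).2.2
    | _, _ => 0

-- ===== PORT B =====
-- `[i for i, v in enumerate(l) if v == x]`, counter k carrying the index
def posIdx (x : Int) : List Int → Nat → List Int
  | [], _ => []
  | e :: t, k => if e = x then (k : Int) :: posIdx x t (k + 1) else posIdx x t (k + 1)

-- B's inner `for j in pos2` loop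
def bInner (i : Int) (pos2 : List Int) (ans : Int) : Int :=
  pos2.foldl (fun ans j => if |i - j| + 1 < ans then |i - j| + 1 else ans) ans

def getMinScore_alt (watch_history : List Int) (series1 : Option Int) (series2 : Option Int) : Int :=
  let n : Int := watch_history.length
  if n = 0 then 0
  else if n = 1 then 1
  else
    match series1 with
    | none => 0
    | some a =>
      match series2 with
      | none => 0
      | some b =>
        if a ∉ watch_history ∨ b ∉ watch_history then 0
        else
          let pos1 := posIdx a watch_history 0
          let pos2 := posIdx b watch_history 0
          pos1.foldl (fun ans i => bInner i pos2 ans) n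

-- ===== PRECONDITION & SPEC =====
def Spec_getMinScore (watch_history : List Int) (series1 : Option Int) (series2 : Option Int) (out : Int) : Prop := out = getMinScore_alt watch_history series1 series2
instance (watch_history : List Int) (series1 : Option Int) (series2 : Option Int) (out : Int) : Decidable (Spec_getMinScore watch_history series1 series2 out) := by unfold Spec_getMinScore; infer_instance

-- ===== CLAIM (what is proved, stated in full; the proofs are below) =====
def Claim_equal_getMinScore : Prop := ∀ (watch_history : List Int) (series1 : Option Int) (series2 : Option Int), Dom_getMinScore watch_history series1 series2 → Spec_getMinScore watch_history series1 series2 (getMinScore watch_history series1 series2)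

-- ===== LEMMAS AND PROOFS =====

-- Both loops compute the unique r with: r ≤ N, r a lower bound of every gap
-- |i-j|+1 (i ∈ P1, j ∈ P2), and r equal to N or to some gap.

lemma min_gap_unique (P1 P2 : List Int) (N r1 r2 : Int)
    (lb1 : ∀ i ∈ P1, ∀ j ∈ P2, r1 ≤ |i - j| + 1)
    (ach1 : r1 = N ∨ ∃ i ∈ P1, ∃ j ∈ P2, r1 = |i - j| + 1)
    (le2 : r2 ≤ N) (lb2 : ∀ i ∈ P1, ∀ j ∈ P2, r2 ≤ |i - j| + 1)
    (ach2 : r2 = N ∨ ∃ i ∈ P1, ∃ j ∈ P2, r2 = |i - j| + 1) (le1 : r1 ≤ N) : r1 = r2 := by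
  rcases ach1 with h1 | ⟨i1, hi1, j1, hj1, h1⟩ <;>
    rcases ach2 with h2 | ⟨i2, hi2, j2, hj2, h2⟩
  · omega
  · have := lb1 i2 hi2 j2 hj2; omega
  · have := lb2 i1 hi1 j1 hj1; omega
  · have := lb1 i2 hi2 j2 hj2; have := lb2 i1 hi1 j1 hj1; omega

-- ---- B-side: properties of the nested min fold ----

lemma bInner_le (i : Int) : ∀ (p2 : List Int) (ans : Int), bInner i p2 ans ≤ ans := by
  intro p2
  induction p2 with
  | nil => intro ans; simp [bInner]
  | cons j t ih =>
    intro ans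
    simp only [bInner, List.foldl_cons]
    split
    · exact le_trans (ih _) (by omega)
    · exact ih ans

lemma bInner_lb (i : Int) : ∀ (p2 : List Int) (ans j : Int), j ∈ p2 → bInner i p2 ans ≤ |i - j| + 1 := by
  intro p2
  induction p2 with
  | nil => intro ans j h; simp at h
  | cons j0 t ih =>
    intro ans j h
    rcases List.mem_cons.1 h with rfl | h
    · simp only [bInner, List.foldl_cons]
      split
      · exact le_trans (bInner_le i t _) (by omega)
      · exact le_trans (bInner_le i t _) (by omega)
    · simp only [bInner, List.foldl_cons]; split <;> exact ih _ j h

lemma bInner_ach (i : Int) : ∀ (p2 : List Int) (ans : Int),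
    bInner i p2 ans = ans ∨ ∃ j ∈ p2, bInner i p2 ans = |i - j| + 1 := by
  intro p2
  induction p2 with
  | nil => intro ans; left; simp [bInner]
  | cons j0 t ih =>
    intro ans
    simp only [bInner, List.foldl_cons]
    split
    · rcases ih (|i - j0| + 1) with h | ⟨j, hj, h⟩
      · right; exact ⟨j0, by simp, h⟩
      · right; exact ⟨j, by simp [hj], h⟩
    · rcases ih ans with h | ⟨j, hj, h⟩
      · left; exact h
      · right; exact ⟨j, by simp [hj], h⟩

lemma bOuter_le : ∀ (p1 : List Int) (p2 : List Int) (ans : Int),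
    p1.foldl (fun ans i => bInner i p2 ans) ans ≤ ans := by
  intro p1
  induction p1 with
  | nil => intro p2 ans; simp
  | cons i0 t ih =>
    intro p2 ans
    simp only [List.foldl_cons]
    exact le_trans (ih p2 _) (bInner_le i0 p2 ans)

lemma bOuter_lb : ∀ (p1 : List Int) (p2 : List Int) (ans i j : Int), i ∈ p1 → j ∈ p2 →
    p1.foldl (fun ans i => bInner i p2 ans) ans ≤ |i - j| + 1 := by
  intro p1
  induction p1 with
  | nil => intro p2 ans i j h; simp at h
  | cons i0 t ih =>
    intro p2 ans i j hi hj
    simp only [List.foldl_cons]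
    rcases List.mem_cons.1 hi with rfl | hi
    · exact le_trans (bOuter_le t p2 _) (bInner_lb i p2 ans j hj)
    · exact ih p2 _ i j hi hj

lemma bOuter_ach : ∀ (p1 : List Int) (p2 : List Int) (ans : Int),
    p1.foldl (fun ans i => bInner i p2 ans) ans = ans ∨
      ∃ i ∈ p1, ∃ j ∈ p2, p1.foldl (fun ans i => bInner i p2 ans) ans = |i - j| + 1 := by
  intro p1
  induction p1 with
  | nil => intro p2 ans; left; simp
  | cons i0 t ih =>
    intro p2 ans
    simp only [List.foldl_cons]
    rcases ih p2 (bInner i0 p2 ans) with h | ⟨i, hi, j, hj, h⟩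
    · rcases bInner_ach i0 p2 ans with h0 | ⟨j, hj, h0⟩
      · left; omega
      · right; exact ⟨i0, by simp, j, hj, by omega⟩
    · right; exact ⟨i, by simp [hi], j, hj, h⟩

-- ---- A-side: loop invariant ----

lemma aLoop_inv (a b N : Int) : ∀ (l : List Int) (k : Nat) (i1 i2 m : Int) (P1 P2 : List Int),
    (i1 ≠ -1 → i1 ∈ P1) → (i1 = -1 → P1 = []) → (∀ x ∈ P1, x ≤ i1) → (∀ x ∈ P1, x < (k : Int)) →
    (i2 ≠ -1 → i2 ∈ P2) → (i2 = -1 → P2 = []) → (∀ x ∈ P2, x ≤ i2) → (∀ x ∈ P2, x < (k : Int)) →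
    m ≤ N →
    (∀ i ∈ P1, ∀ j ∈ P2, m ≤ |i - j| + 1) →
    (m = N ∨ ∃ i ∈ P1, ∃ j ∈ P2, m = |i - j| + 1) →
    (aLoop a b l k (i1, i2, m)).2.2 ≤ N ∧
    (∀ i ∈ P1 ++ posIdx a l k, ∀ j ∈ P2 ++ posIdx b l k,
        (aLoop a b l k (i1, i2, m)).2.2 ≤ |i - j| + 1) ∧
    ((aLoop a b l k (i1, i2, m)).2.2 = N ∨
      ∃ i ∈ P1 ++ posIdx a l k, ∃ j ∈ P2 ++ posIdx b l k,
        (aLoop a b l k (i1, i2, m)).2.2 = |i - j| + 1) := by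
  intro l
  induction l with
  | nil =>
    intro k i1 i2 m P1 P2 _ _ _ _ _ _ _ _ hle hlb hach
    simpa [aLoop, posIdx] using ⟨hle, hlb, hach⟩
  | cons e t ih =>
    intro k i1 i2 m P1 P2 h1mem h1emp h1max h1lt h2mem h2emp h2max h2lt hle hlb hach
    set i1' : Int := if e = a then (k : Int) else i1 with hi1'
    set i2' : Int := if e = b then (k : Int) else i2 with hi2'
    set m' : Int := if i1' ≠ -1 ∧ i2' ≠ -1 then min m (|i1' - i2'| + 1) else m with hm'
    set Q1 : List Int := P1 ++ (if e = a then [(k : Int)] else []) with hQ1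
    set Q2 : List Int := P2 ++ (if e = b then [(k : Int)] else []) with hQ2
    have hsub1 : ∀ x ∈ P1, x ∈ Q1 := fun x hx => by rw [hQ1]; exact List.mem_append_left _ hx
    have hsub2 : ∀ x ∈ P2, x ∈ Q2 := fun x hx => by rw [hQ2]; exact List.mem_append_left _ hx
    have hpos1 : posIdx a (e :: t) k = (if e = a then [(k : Int)] else []) ++ posIdx a t (k + 1) := by
      simp only [posIdx]; split <;> simp
    have hpos2 : posIdx b (e :: t) k = (if e = b then [(k : Int)] else []) ++ posIdx b t (k + 1) := by
      simp only [posIdx]; split <;> simp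
    -- the new state satisfies the invariant at k+1
    have g1mem : i1' ≠ -1 → i1' ∈ Q1 := by
      intro h
      by_cases hea : e = a
      · rw [hi1', hQ1]; simp [hea]
      · rw [hi1'] at h ⊢; rw [hQ1]
        simp only [hea, if_false] at h
        simp [hea]
        exact h1mem h
    have g1emp : i1' = -1 → Q1 = [] := by
      intro h
      by_cases hea : e = a
      · exfalso; rw [hi1', if_pos hea] at h; omega
      · rw [hi1', if_neg hea] at h
        rw [hQ1]; simp [hea, h1emp h]
    have g1max : ∀ x ∈ Q1, x ≤ i1' := by
      intro x hx; rw [hQ1] at hx; rw [hi1']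
      rcases List.mem_append.1 hx with hx | hx
      · by_cases hea : e = a
        · have := h1lt x hx; rw [if_pos hea]; omega
        · rw [if_neg hea]; exact h1max x hx
      · by_cases hea : e = a
        · rw [if_pos hea] at hx ⊢; simp at hx; omega
        · rw [if_neg hea] at hx; simp at hx
    have g1lt : ∀ x ∈ Q1, x < ((k + 1 : Nat) : Int) := by
      intro x hx; rw [hQ1] at hx; push_cast
      rcases List.mem_append.1 hx with hx | hx
      · have := h1lt x hx; omega
      · by_cases hea : e = a
        · rw [if_pos hea] at hx; simp at hx; omega
        · rw [if_neg hea] at hx; simp at hx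
    have g2mem : i2' ≠ -1 → i2' ∈ Q2 := by
      intro h
      by_cases heb : e = b
      · rw [hi2', hQ2]; simp [heb]
      · rw [hi2'] at h ⊢; rw [hQ2]
        simp only [heb, if_false] at h
        simp [heb]
        exact h2mem h
    have g2emp : i2' = -1 → Q2 = [] := by
      intro h
      by_cases heb : e = b
      · exfalso; rw [hi2', if_pos heb] at h; omega
      · rw [hi2', if_neg heb] at h
        rw [hQ2]; simp [heb, h2emp h]
    have g2max : ∀ x ∈ Q2, x ≤ i2' := by
      intro x hx; rw [hQ2] at hx; rw [hi2']
      rcases List.mem_append.1 hx with hx | hx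
      · by_cases heb : e = b
        · have := h2lt x hx; rw [if_pos heb]; omega
        · rw [if_neg heb]; exact h2max x hx
      · by_cases heb : e = b
        · rw [if_pos heb] at hx ⊢; simp at hx; omega
        · rw [if_neg heb] at hx; simp at hx
    have g2lt : ∀ x ∈ Q2, x < ((k + 1 : Nat) : Int) := by
      intro x hx; rw [hQ2] at hx; push_cast
      rcases List.mem_append.1 hx with hx | hx
      · have := h2lt x hx; omega
      · by_cases heb : e = b
        · rw [if_pos heb] at hx; simp at hx; omega
        · rw [if_neg heb] at hx; simp at hx
    have hm'm : m' ≤ m := by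
      rw [hm']; split <;> omega
    have gle : m' ≤ N := le_trans hm'm hle
    have glb : ∀ i ∈ Q1, ∀ j ∈ Q2, m' ≤ |i - j| + 1 := by
      intro i hi j hj
      rw [hQ1] at hi; rw [hQ2] at hj
      rcases List.mem_append.1 hi with hi | hi <;> rcases List.mem_append.1 hj with hj | hj
      · exact le_trans hm'm (hlb i hi j hj)
      · -- i ∈ P1 old, j the new index k, so e = b
        by_cases heb : e = b
        swap; · simp [heb] at hj
        simp [heb] at hj; subst hj
        have hi1ne : i1 ≠ -1 := by
          intro h; rw [h1emp h] at hi; simp at hi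
        have hc1 : i1' ≠ -1 := by
          rw [hi1']; by_cases hea : e = a
          · rw [if_pos hea]; omega
          · rw [if_neg hea]; exact hi1ne
        have hc2 : i2' = (k : Int) := by rw [hi2']; simp [heb]
        have hup : i ≤ i1' ∧ i1' ≤ (k : Int) := by
          rw [hi1']; by_cases hea : e = a
          · have := h1lt i hi; rw [if_pos hea]; omega
          · have := h1lt i1 (h1mem hi1ne); have := h1max i hi; rw [if_neg hea]; omega
        have hm'eq : m' = min m (|i1' - i2'| + 1) := by
          rw [hm', if_pos ⟨hc1, by rw [hc2]; omega⟩]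
        rw [hm'eq, hc2]
        rcases abs_cases (i1' - (k : Int)) with ⟨ha1, ha2⟩ | ⟨ha1, ha2⟩ <;>
          rcases abs_cases (i - (k : Int)) with ⟨hb1, hb2⟩ | ⟨hb1, hb2⟩ <;> omega
      · -- j ∈ P2 old, i the new index k, so e = a
        by_cases hea : e = a
        swap; · simp [hea] at hi
        simp [hea] at hi; subst hi
        have hi2ne : i2 ≠ -1 := by
          intro h; rw [h2emp h] at hj; simp at hj
        have hc2 : i2' ≠ -1 := by
          rw [hi2']; by_cases heb : e = b
          · rw [if_pos heb]; omega
          · rw [if_neg heb]; exact hi2ne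
        have hc1 : i1' = (k : Int) := by rw [hi1']; simp [hea]
        have hup : j ≤ i2' ∧ i2' ≤ (k : Int) := by
          rw [hi2']; by_cases heb : e = b
          · have := h2lt j hj; rw [if_pos heb]; omega
          · have := h2lt i2 (h2mem hi2ne); have := h2max j hj; rw [if_neg heb]; omega
        have hm'eq : m' = min m (|i1' - i2'| + 1) := by
          rw [hm', if_pos ⟨by rw [hc1]; omega, hc2⟩]
        rw [hm'eq, hc1]
        rcases abs_cases ((k : Int) - i2') with ⟨ha1, ha2⟩ | ⟨ha1, ha2⟩ <;>
          rcases abs_cases ((k : Int) - j) with ⟨hb1, hb2⟩ | ⟨hb1, hb2⟩ <;> omega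
      · -- both new: i = j = k
        by_cases hea : e = a
        swap; · simp [hea] at hi
        by_cases heb : e = b
        swap; · simp [heb] at hj
        simp [hea] at hi; simp [heb] at hj; subst hi; subst hj
        have hc1 : i1' = (k : Int) := by rw [hi1']; simp [hea]
        have hc2 : i2' = (k : Int) := by rw [hi2']; simp [heb]
        have hm'eq : m' = min m (|i1' - i2'| + 1) := by
          rw [hm', if_pos ⟨by rw [hc1]; omega, by rw [hc2]; omega⟩]
        rw [hm'eq, hc1, hc2]
        rcases abs_cases ((k : Int) - (k : Int)) with ⟨ha1, ha2⟩ | ⟨ha1, ha2⟩ <;> omega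
    have gach : m' = N ∨ ∃ i ∈ Q1, ∃ j ∈ Q2, m' = |i - j| + 1 := by
      have lift : (m = N ∨ ∃ i ∈ P1, ∃ j ∈ P2, m = |i - j| + 1) → m' = m →
          m' = N ∨ ∃ i ∈ Q1, ∃ j ∈ Q2, m' = |i - j| + 1 := by
        rintro (h | ⟨i, hi, j, hj, h⟩) he
        · left; omega
        · right; exact ⟨i, hsub1 i hi, j, hsub2 j hj, by omega⟩
      by_cases hcond : i1' ≠ -1 ∧ i2' ≠ -1
      · rcases le_total m (|i1' - i2'| + 1) with hc | hc
        · exact lift hach (by rw [hm', if_pos hcond]; omega)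
        · right
          refine ⟨i1', g1mem hcond.1, i2', g2mem hcond.2, ?_⟩
          rw [hm', if_pos hcond]; omega
      · exact lift hach (by rw [hm', if_neg hcond])
    have key := ih (k + 1) i1' i2' m' Q1 Q2 g1mem g1emp g1max g1lt g2mem g2emp g2max g2lt gle glb gach
    rw [hQ1, hQ2] at key
    rw [hm', hi1', hi2'] at key
    have hstep : aLoop a b (e :: t) k (i1, i2, m) =
        aLoop a b t (k + 1)
          (if e = a then (k : Int) else i1, if e = b then (k : Int) else i2,
            if (if e = a then (k : Int) else i1) ≠ -1 ∧ (if e = b then (k : Int) else i2) ≠ -1 then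
              min m (|(if e = a then (k : Int) else i1) - (if e = b then (k : Int) else i2)| + 1)
            else m) := rfl
    rw [hstep, hpos1, hpos2]
    simpa [List.append_assoc] using key

-- ===== VERDICT (by name: the statement is the Claim_ definition above) =====
theorem getMinScore_spec : Claim_equal_getMinScore := by
  intro wh s1 s2 _
  unfold Spec_getMinScore getMinScore getMinScore_alt
  by_cases h0 : (wh.length : Int) = 0
  · simp [h0]
  by_cases h1 : (wh.length : Int) = 1
  · simp [h1]
  simp only [h0, h1, if_false]
  match s1, s2 with
  | none, _ => rfl
  | some a, none => rfl
  | some a, some b =>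
    by_cases hmem : a ∉ wh ∨ b ∉ wh
    · simp [hmem]
    · simp only [hmem, if_false]
      have hA := aLoop_inv a b (wh.length : Int) wh 0 (-1) (-1) (wh.length : Int) [] []
        (by simp) (fun _ => rfl) (by simp) (by simp) (by simp) (fun _ => rfl) (by simp) (by simp)
        le_rfl (by simp) (Or.inl rfl)
      simp only [List.nil_append] at hA
      exact min_gap_unique (posIdx a wh 0) (posIdx b wh 0) (wh.length : Int) _ _
        hA.2.1 hA.2.2
        (bOuter_le _ _ _) (fun i hi j hj => bOuter_lb _ _ _ i j hi hj)
        (bOuter_ach _ _ _) hA.1
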